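-- pv_equiv track=rewrite | github.com/josedsilva20/Programming-fundamentals | labs/Resoluções/Lab06-07/ex06.py | num_para_seq_cod
-- ===== SOURCE A (Python) =====
-- def num_para_seq_cod(num):
--     if not (isinstance(num, int) and num > 0):
--         raise ValueError("Argumento inválido.")
--
--     aux = ()
--     res = ()
--     while (num > 0):
--         aux += (num % 10,)
--         num = num // 10
--
--     for i in aux:
--         if (i % 2 == 0):
--             res += ((i + 2) % 10,)
--         else:
--             res += (abs(i - 2) % 10,)
--
--     return res
-- ===== SOURCE B (Python) =====
-- def num_para_seq_cod(num):
--     if not (isinstance(num, int) and num > 0):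
--         raise ValueError("Argumento inválido.")
--     return tuple(
--         (d + 2) % 10 if d % 2 == 0 else abs(d - 2) % 10
--         for d in (ord(c) - 48 for c in reversed(str(int(num))))
--     )
-- ===== Notes on version B (the rewrite author's own statement) =====
-- stated objective: idiomatic
-- what changed: B extracts the digits from the reversed decimal string representation in a single comprehension instead of A's while-loop of repeated floor divisions plus a second tuple-accumulating for-loop.
import Mathlib
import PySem

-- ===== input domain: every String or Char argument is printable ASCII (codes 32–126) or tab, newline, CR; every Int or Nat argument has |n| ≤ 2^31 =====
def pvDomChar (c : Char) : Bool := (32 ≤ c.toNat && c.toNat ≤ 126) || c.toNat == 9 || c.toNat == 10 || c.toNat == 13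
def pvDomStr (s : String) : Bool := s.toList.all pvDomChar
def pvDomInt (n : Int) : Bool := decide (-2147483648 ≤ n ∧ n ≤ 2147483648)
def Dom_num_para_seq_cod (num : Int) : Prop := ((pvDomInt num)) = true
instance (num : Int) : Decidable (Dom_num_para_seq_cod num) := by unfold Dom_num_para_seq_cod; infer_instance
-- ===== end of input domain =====

-- B replaces A's while-division loop plus second tuple-accumulating loop by one map over the
-- reversed decimal string representation (idiomatic; return value only, no speed claim).

-- ===== PORT A =====
-- the 'while num > 0' loop building aux (digits least-significant first, appended at the end)
def pvAuxLoop (num : Int) (aux : List Int) : List Int :=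
  if 0 < num then
    pvAuxLoop (PySem.Int.floordiv num 10) (aux ++ [PySem.Int.mod num 10])
  else aux
termination_by num.toNat
decreasing_by
  simp only [PySem.Int.floordiv]
  rw [Int.fdiv_eq_ediv_of_nonneg num (by norm_num)]
  omega

def num_para_seq_cod (num : Int) : List Int :=
  let aux := pvAuxLoop num []
  aux.foldl (fun res i =>
    res ++ [if PySem.Int.mod i 2 = 0 then PySem.Int.mod (i + 2) 10
            else PySem.Int.mod ((i - 2).natAbs : Int) 10]) []

-- ===== PORT B =====
def num_para_seq_cod_alt (num : Int) : List Int :=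
  ((PySem.Int.toStr num).toList.reverse).map (fun c =>
    let d : Int := (c.toNat : Int) - 48   -- ord(c) - 48
    if PySem.Int.mod d 2 = 0 then PySem.Int.mod (d + 2) 10
    else PySem.Int.mod ((d - 2).natAbs : Int) 10)

-- ===== PRECONDITION & SPEC =====
-- Pre_: A raises ValueError on non-positive num (and so does B); only positive ints are accepted.
def Pre_num_para_seq_cod (num : Int) : Prop := 0 < num
instance (num : Int) : Decidable (Pre_num_para_seq_cod num) := by unfold Pre_num_para_seq_cod; infer_instance
def pvWitness_num_para_seq_cod : Int := 907

def Spec_num_para_seq_cod (num : Int) (out : List Int) : Prop := out = num_para_seq_cod_alt num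
instance (num : Int) (out : List Int) : Decidable (Spec_num_para_seq_cod num out) := by unfold Spec_num_para_seq_cod; infer_instance

-- ===== CLAIM (what is proved, stated in full; the proofs are below) =====
def Claim_equal_num_para_seq_cod : Prop := ∀ (num : Int), Dom_num_para_seq_cod num → Pre_num_para_seq_cod num → Spec_num_para_seq_cod num (num_para_seq_cod num)

-- ===== LEMMAS AND PROOFS =====

-- digits of a natural number, least significant first (empty for 0)
def pvNatDigs (n : Nat) : List Int :=
  if h : n = 0 then [] else ((n % 10 : Nat) : Int) :: pvNatDigs (n / 10)
decreasing_by omega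

-- the common per-digit transform, on an Int digit
def pvTrans (i : Int) : Int :=
  if PySem.Int.mod i 2 = 0 then PySem.Int.mod (i + 2) 10
  else PySem.Int.mod ((i - 2).natAbs : Int) 10

theorem pvAuxLoop_eq (k : Nat) : ∀ (num : Int) (acc : List Int), num.toNat ≤ k → 0 ≤ num →
    pvAuxLoop num acc = acc ++ pvNatDigs num.toNat := by
  induction k with
  | zero =>
    intro num acc hk h0
    have : num = 0 := by omega
    subst this
    rw [pvAuxLoop.eq_def, pvNatDigs]
    simp
  | succ k ih =>
    intro num acc hk h0
    rw [pvAuxLoop.eq_def]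
    by_cases hpos : 0 < num
    · simp only [hpos, if_true]
      have hfd : PySem.Int.floordiv num 10 = num / 10 := by
        simp only [PySem.Int.floordiv]
        exact Int.fdiv_eq_ediv_of_nonneg num (by norm_num)
      have hmd : PySem.Int.mod num 10 = num % 10 := by
        simp only [PySem.Int.mod]
        exact Int.fmod_eq_emod_of_nonneg num (by norm_num)
      rw [hfd, hmd, ih (num / 10) _ (by omega) (by omega)]
      have hne : num.toNat ≠ 0 := by omega
      conv_rhs => rw [pvNatDigs]
      rw [dif_neg hne]
      have h1 : ((num.toNat % 10 : Nat) : Int) = num % 10 := by omega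
      have h2 : (num / 10).toNat = num.toNat / 10 := by omega
      rw [h1, h2, List.append_assoc]
      rfl
    · simp only [hpos, if_false]
      have h0 : num.toNat = 0 := by omega
      rw [h0, pvNatDigs]
      simp

theorem foldl_append_map (f : Int → Int) : ∀ (l : List Int) (r : List Int),
    List.foldl (fun res i => res ++ [f i]) r l = r ++ l.map f := by
  intro l
  induction l with
  | nil => simp
  | cons x xs ih => intro r; simp [List.foldl, ih, List.append_assoc]

-- chars of n, least significant first (what toDigitsCore pushes onto the accumulator)
def pvRevDigs (n : Nat) : List Char :=
  Nat.digitChar (n % 10) :: (if h : n / 10 = 0 then [] else pvRevDigs (n / 10))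
decreasing_by omega

theorem toDigitsCore_reverse : ∀ (fuel n : Nat) (acc : List Char), n < fuel →
    (Nat.toDigitsCore 10 fuel n acc).reverse = acc.reverse ++ pvRevDigs n := by
  intro fuel
  induction fuel with
  | zero => intro n acc h; omega
  | succ f ih =>
    intro n acc h
    rw [Nat.toDigitsCore]
    by_cases h0 : n / 10 = 0
    · simp only [h0, if_true]
      rw [pvRevDigs]
      simp [h0]
    · simp only [h0, if_false]
      have hlt : n / 10 < f := by omega
      rw [ih (n / 10) _ hlt]
      conv_rhs => rw [pvRevDigs]
      simp [h0, List.append_assoc]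

theorem digit_char_trans (d : Nat) (hd : d < 10) :
    (fun c => let i : Int := (c.toNat : Int) - 48;
      if PySem.Int.mod i 2 = 0 then PySem.Int.mod (i + 2) 10
      else PySem.Int.mod ((i - 2).natAbs : Int) 10) (Nat.digitChar d) = pvTrans (d : Int) := by
  interval_cases d <;> decide

theorem revDigs_map (k : Nat) : ∀ (n : Nat), n ≤ k → 0 < n →
    (pvRevDigs n).map (fun c => let i : Int := (c.toNat : Int) - 48;
      if PySem.Int.mod i 2 = 0 then PySem.Int.mod (i + 2) 10
      else PySem.Int.mod ((i - 2).natAbs : Int) 10) = (pvNatDigs n).map pvTrans := by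
  induction k with
  | zero => intro n h1 h2; omega
  | succ k ih =>
    intro n h1 h2
    rw [pvRevDigs, pvNatDigs]
    have hne : n ≠ 0 := by omega
    simp only [hne, dif_neg, not_false_iff, List.map_cons]
    congr 1
    · exact digit_char_trans (n % 10) (Nat.mod_lt _ (by norm_num))
    · by_cases h0 : n / 10 = 0
      · simp only [h0, dif_pos]
        rw [pvNatDigs]
        simp
      · simp only [h0, dif_neg, not_false_iff]
        exact ih (n / 10) (by omega) (by omega)

-- ===== VERDICT (by name: the statement is the Claim_ definition above) =====
theorem num_para_seq_cod_spec : Claim_equal_num_para_seq_cod := by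
  intro num hdom hpre
  unfold Spec_num_para_seq_cod num_para_seq_cod num_para_seq_cod_alt
  have hpre' : (0:Int) < num := hpre
  rw [pvAuxLoop_eq num.toNat num [] (le_refl _) (by omega)]
  rw [List.nil_append, foldl_append_map]
  rw [List.nil_append]
  have htl : (PySem.Int.toStr num).toList = PySem.Int.toChars num := PySem.Int.toList_toStr num
  rw [htl]
  have hnn : ¬ num < 0 := by omega
  simp only [PySem.Int.toChars, hnn, if_false]
  rw [Nat.toDigits, toDigitsCore_reverse (num.toNat + 1) num.toNat [] (by omega)]
  rw [List.reverse_nil, List.nil_append]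
  exact (revDigs_map num.toNat num.toNat (le_refl _) (by omega)).symm
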